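-- pv_equiv track=rewrite | github.com/Pichayanon/detect-green-circle | extract_graph_from_image.py | is_year_x_label_valid_range
-- ===== SOURCE A (Python) =====
-- def is_year_x_label_valid_range(gaps):
--     if not gaps:
--         return False
--     if len(gaps) == 1:
--         return True
--     if len(gaps) <= 3 and not (all(g == 1 for g in gaps)):
--         return False
--     if all(g == 1 for g in gaps):
--         return True
--     if all((g == 1 if i % 2 == 0 else g != 1) for i, g in enumerate(gaps)):
--         return True
--     if all((g != 1 if i % 2 == 0 else g == 1) for i, g in enumerate(gaps)):
--         return True
--     return False
-- ===== SOURCE B (Python) =====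
-- def is_year_x_label_valid_range(gaps):
--     if not gaps:
--         return False
--     if len(gaps) == 1:
--         return True
--     bits = [g == 1 for g in gaps]
--     if all(b == bits[0] for b in bits):
--         return bits[0]
--     if all(bits[i] != bits[i - 1] for i in range(1, len(bits))):
--         return len(gaps) >= 4
--     return False
-- ===== Notes on version B (the rewrite author's own statement) =====
-- stated objective: simpler
-- what changed: Replaces A's four separate whole-list scans (all-ones twice plus two index-parity enumerate scans) and the hard-coded short-length guard by one boolean mask classified with an all-same check and a single phase-agnostic consecutive-pair alternation pass, returning the first mask bit resp. a computed length test.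
import Mathlib
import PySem

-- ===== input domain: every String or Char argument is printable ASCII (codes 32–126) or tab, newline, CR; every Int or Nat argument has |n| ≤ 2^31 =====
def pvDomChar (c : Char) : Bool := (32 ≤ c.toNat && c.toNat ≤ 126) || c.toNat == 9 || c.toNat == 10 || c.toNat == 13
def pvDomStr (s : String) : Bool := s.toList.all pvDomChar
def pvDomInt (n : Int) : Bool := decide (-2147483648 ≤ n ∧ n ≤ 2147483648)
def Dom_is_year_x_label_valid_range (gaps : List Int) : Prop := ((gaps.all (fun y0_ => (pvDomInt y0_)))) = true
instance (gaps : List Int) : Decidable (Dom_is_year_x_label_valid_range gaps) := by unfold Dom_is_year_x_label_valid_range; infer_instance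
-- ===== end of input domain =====

-- B classifies the boolean mask [g == 1] with one all-same check and one consecutive-pair
-- alternation pass, replacing A's four whole-list scans and the len<=3 guard (objective: simpler).

-- ===== PORT A =====
def is_year_x_label_valid_range (gaps : List Int) : Bool :=
  if gaps.isEmpty then false
  else if gaps.length == 1 then true
  else if decide (gaps.length ≤ 3) && !(gaps.all (fun g => g == 1)) then false
  else if gaps.all (fun g => g == 1) then true
  else if (PySem.List.enumerate gaps 0).all
      (fun p => if PySem.Int.mod p.1 2 == 0 then p.2 == 1 else p.2 != 1) then true
  else if (PySem.List.enumerate gaps 0).all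
      (fun p => if PySem.Int.mod p.1 2 == 0 then p.2 != 1 else p.2 == 1) then true
  else false

-- ===== PORT B =====
-- hand port (exact) of the generator 'all(bits[i] != bits[i-1] for i in range(1, len(bits)))':
-- each adjacent pair is compared once, left to right.
def pvAdjAlt : List Bool → Bool
  | [] => true
  | [_] => true
  | a :: b :: rest => (a != b) && pvAdjAlt (b :: rest)

def is_year_x_label_valid_range_alt (gaps : List Int) : Bool :=
  if gaps.isEmpty then false
  else if gaps.length == 1 then true
  else
    let bits := gaps.map (fun g => g == 1)
    let b0 := bits.headD false   -- bits[0]; bits is nonempty on this branch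
    if bits.all (fun b => b == b0) then b0
    else if pvAdjAlt bits then decide (gaps.length ≥ 4)
    else false

-- ===== PRECONDITION & SPEC =====
def Spec_is_year_x_label_valid_range (gaps : List Int) (out : Bool) : Prop := out = is_year_x_label_valid_range_alt gaps
instance (gaps : List Int) (out : Bool) : Decidable (Spec_is_year_x_label_valid_range gaps out) := by unfold Spec_is_year_x_label_valid_range; infer_instance

-- ===== CLAIM (what is proved, stated in full; the proofs are below) =====
def Claim_equal_is_year_x_label_valid_range : Prop := ∀ (gaps : List Int), Dom_is_year_x_label_valid_range gaps → Spec_is_year_x_label_valid_range gaps (is_year_x_label_valid_range gaps)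

-- ===== LEMMAS AND PROOFS =====

-- "the list matches the alternating expectation 1, ≠1, 1, … when the phase is p, !p, p, …"
def pvChain (p : Bool) : List Int → Bool
  | [] => true
  | g :: gs => ((g == 1) == p) && pvChain (!p) gs

theorem pvMod2_flip (s : Int) :
    (PySem.Int.mod (s + 1) 2 == 0) = !(PySem.Int.mod s 2 == 0) := by
  have h2 : (0:Int) < 2 := by norm_num
  rw [PySem.Int.mod_eq_emod_of_pos h2, PySem.Int.mod_eq_emod_of_pos h2]
  cases h : ((s % 2 : Int) == 0) <;> simp_all [beq_iff_eq] <;> omega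

theorem pvEnumChain (gs : List Int) (s : Int) (hs : 0 ≤ s) :
    ((PySem.List.enumerate gs s).all
      (fun p => if PySem.Int.mod p.1 2 == 0 then p.2 == 1 else p.2 != 1))
      = pvChain (PySem.Int.mod s 2 == 0) gs := by
  induction gs generalizing s with
  | nil => simp [pvChain]
  | cons g gs ih =>
      rw [PySem.List.enumerate_cons]
      rw [List.all_cons, ih (s + 1) (by omega), pvMod2_flip s]
      cases h : (PySem.Int.mod s 2 == 0) <;> cases hg : (g == 1 : Bool) <;>
        simp_all [pvChain, bne]

theorem pvEnumChain2 (gs : List Int) (s : Int) (hs : 0 ≤ s) :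
    ((PySem.List.enumerate gs s).all
      (fun p => if PySem.Int.mod p.1 2 == 0 then p.2 != 1 else p.2 == 1))
      = pvChain (!(PySem.Int.mod s 2 == 0)) gs := by
  induction gs generalizing s with
  | nil => simp [pvChain]
  | cons g gs ih =>
      rw [PySem.List.enumerate_cons]
      rw [List.all_cons, ih (s + 1) (by omega), pvMod2_flip s]
      cases h : (PySem.Int.mod s 2 == 0) <;> cases hg : (g == 1 : Bool) <;>
        simp_all [pvChain, bne]

theorem pvAdjChain (gs : List Int) (p : Bool) :
    pvAdjAlt (p :: gs.map (fun g => g == 1)) = pvChain (!p) gs := by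
  induction gs generalizing p with
  | nil => simp [pvAdjAlt, pvChain]
  | cons g gs ih =>
      simp only [List.map_cons, pvAdjAlt, ih (g == 1)]
      cases hg : (g == 1 : Bool) <;> cases p <;> simp [pvChain, hg]

theorem pvChain_cons (g : Int) (gs : List Int) (p : Bool) :
    pvChain p (g :: gs) = ((((g == 1) : Bool) == p) && pvAdjAlt ((g :: gs).map (fun x => x == 1))) := by
  simp only [List.map_cons, pvAdjChain gs (g == 1)]
  cases hg : (g == 1 : Bool) <;> cases p <;> simp [pvChain, hg]

-- ===== VERDICT (by name: the statement is the Claim_ definition above) =====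
theorem is_year_x_label_valid_range_spec : Claim_equal_is_year_x_label_valid_range := by
  intro gaps _
  show is_year_x_label_valid_range gaps = is_year_x_label_valid_range_alt gaps
  match gaps with
  | [] => rfl
  | [g] => simp [is_year_x_label_valid_range, is_year_x_label_valid_range_alt]
  | g1 :: g2 :: rest =>
      unfold is_year_x_label_valid_range is_year_x_label_valid_range_alt
      rw [pvEnumChain _ 0 (by norm_num), pvEnumChain2 _ 0 (by norm_num)]
      have h0 : (PySem.Int.mod 0 2 == 0) = true := by decide
      rw [h0]
      rw [pvChain_cons, pvChain_cons]
      simp only [List.isEmpty_cons, List.length_cons, List.map_cons, List.all_cons,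
        List.all_map, List.headD_cons, Bool.false_eq_true, if_false]
      rcases Bool.eq_false_or_eq_true (g1 == 1) with hb1 | hb1 <;>
        rcases Bool.eq_false_or_eq_true (g2 == 1) with hb2 | hb2 <;>
        by_cases hl : rest.length + 1 + 1 ≤ 3 <;>
        by_cases ha : pvAdjAlt ((g2 == 1) :: List.map (fun g => g == 1) rest) = true <;>
        by_cases hall : rest.all (fun g => (g == 1 : Bool)) = true <;>
        simp_all [pvAdjAlt, Function.comp_def] <;> omega
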